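-- pv_equiv track=rewrite | github.com/omerfazil08/grad_proj_2 | evolution_phase4.py | _apply_gate
-- ===== SOURCE A (Python) =====
-- from typing import List, Tuple, Dict, Any, Literal
--
-- def _apply_gate(gname: str, in_bits: List[int]) -> int:
--     # Extend 2-input gate semantics to k-input:
--     # AND/OR/XOR fold across inputs; NAND/NOR/XNOR are inverted versions.
--     if gname == 'AND':
--         v = 1
--         for b in in_bits: v &= b
--         return v
--     if gname == 'OR':
--         v = 0
--         for b in in_bits: v |= b
--         return v
--     if gname == 'XOR':
--         v = 0
--         for b in in_bits: v ^= b
--         return v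
--     if gname == 'NAND':
--         return 1 - _apply_gate('AND', in_bits)
--     if gname == 'NOR':
--         return 1 - _apply_gate('OR', in_bits)
--     if gname == 'XNOR':
--         return 1 - _apply_gate('XOR', in_bits)
--     # fallback (shouldn't happen)
--     return 0
-- ===== SOURCE B (Python) =====
-- # B: balanced divide-and-conquer tree reduction over [identity] + bits (correct because
-- # &, |, ^ are associative), replacing A's linear accumulator folds and recursive inverted calls.
-- _TABLE = {
--     'AND':  ((lambda a, b: a & b), 1, False),
--     'OR':   ((lambda a, b: a | b), 0, False),
--     'XOR':  ((lambda a, b: a ^ b), 0, False),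
--     'NAND': ((lambda a, b: a & b), 1, True),
--     'NOR':  ((lambda a, b: a | b), 0, True),
--     'XNOR': ((lambda a, b: a ^ b), 0, True),
-- }
--
-- def _reduce_tree(op, xs):
--     # xs nonempty: split in half, reduce each half, combine.
--     if len(xs) == 1:
--         return xs[0]
--     m = len(xs) // 2
--     return op(_reduce_tree(op, xs[:m]), _reduce_tree(op, xs[m:]))
--
-- def _apply_gate(gname, in_bits):
--     entry = _TABLE.get(gname)
--     if entry is None:
--         return 0
--     op, ident, inv = entry
--     v = _reduce_tree(op, [ident] + list(in_bits))
--     return 1 - v if inv else v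
-- ===== Notes on version B (the rewrite author's own statement) =====
-- stated objective: alternative
-- what changed: Replaces A's linear left-fold accumulator loops and three recursive inverted-gate calls by a balanced divide-and-conquer tree reduction over [identity]+bits (correct by associativity of &,|,^), selected through one (operator, identity, invert) table.
import Mathlib
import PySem

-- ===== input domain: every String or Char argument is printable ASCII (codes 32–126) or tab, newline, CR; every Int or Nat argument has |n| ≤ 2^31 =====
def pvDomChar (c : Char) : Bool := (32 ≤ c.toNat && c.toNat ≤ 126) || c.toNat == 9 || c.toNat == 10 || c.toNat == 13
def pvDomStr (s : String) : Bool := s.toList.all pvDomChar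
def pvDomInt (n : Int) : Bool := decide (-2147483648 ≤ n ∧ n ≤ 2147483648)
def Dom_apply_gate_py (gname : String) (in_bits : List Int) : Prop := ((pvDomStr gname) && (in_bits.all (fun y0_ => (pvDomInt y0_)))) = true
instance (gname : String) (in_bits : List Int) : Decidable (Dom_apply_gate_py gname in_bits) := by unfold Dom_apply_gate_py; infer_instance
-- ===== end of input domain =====

-- B replaces A's linear accumulator folds and three recursive inverted-gate calls by a balanced
-- divide-and-conquer tree reduction over [identity]+bits (correct by associativity of &,|,^),
-- selected through one (operator, identity, invert) dispatch table — objective: alternative.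


-- ===== PORT A =====
-- Literal transliteration of A: if-chain of gate names; AND/OR/XOR fold left, NAND/NOR/XNOR recurse.
def apply_gate_py (gname : String) (in_bits : List Int) : Int :=
  if gname = "AND" then
    in_bits.foldl (fun v b => PySem.Int.band v b) 1
  else if gname = "OR" then
    in_bits.foldl (fun v b => PySem.Int.bor v b) 0
  else if gname = "XOR" then
    in_bits.foldl (fun v b => PySem.Int.bxor v b) 0
  else if gname = "NAND" then
    1 - apply_gate_py "AND" in_bits
  else if gname = "NOR" then
    1 - apply_gate_py "OR" in_bits
  else if gname = "XNOR" then
    1 - apply_gate_py "XOR" in_bits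
  else
    0
termination_by (if gname = "NAND" ∨ gname = "NOR" ∨ gname = "XNOR" then 1 else 0)
decreasing_by all_goals simp_all

-- ===== PORT B =====
-- _reduce_tree: balanced divide-and-conquer reduction of a nonempty list (0 on [] is unreachable).
def pvTreeReduce (op : Int → Int → Int) : List Int → Int
  | [] => 0
  | [b] => b
  | a :: b :: rest =>
    let xs := a :: b :: rest
    let m := xs.length / 2
    op (pvTreeReduce op (xs.take m)) (pvTreeReduce op (xs.drop m))
termination_by xs => xs.length
decreasing_by
  · simp; omega
  · simp; omega

-- _TABLE: gate name ↦ (operator, identity, invert flag).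
def pvOpsTable : PySem.Dict String ((Int → Int → Int) × Int × Bool) :=
  PySem.Dict.mk [("AND", (PySem.Int.band, 1, false)), ("OR", (PySem.Int.bor, 0, false)),
   ("XOR", (PySem.Int.bxor, 0, false)), ("NAND", (PySem.Int.band, 1, true)),
   ("NOR", (PySem.Int.bor, 0, true)), ("XNOR", (PySem.Int.bxor, 0, true))]

def apply_gate_py_alt (gname : String) (in_bits : List Int) : Int :=
  match PySem.Dict.get? pvOpsTable gname with
  | none => 0
  | some (op, ident, inv) =>
    let v := pvTreeReduce op (ident :: in_bits)
    if inv then 1 - v else v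

-- ===== PRECONDITION & SPEC =====
def Spec_apply_gate_py (gname : String) (in_bits : List Int) (out : Int) : Prop := out = apply_gate_py_alt gname in_bits
instance (gname : String) (in_bits : List Int) (out : Int) : Decidable (Spec_apply_gate_py gname in_bits out) := by unfold Spec_apply_gate_py; infer_instance

-- ===== CLAIM (what is proved, stated in full; the proofs are below) =====
def Claim_equal_apply_gate_py : Prop := ∀ (gname : String) (in_bits : List Int), Dom_apply_gate_py gname in_bits → Spec_apply_gate_py gname in_bits (apply_gate_py gname in_bits)

-- ===== LEMMAS AND PROOFS =====

theorem pv_ldiff_zero_left (k : Nat) : Nat.ldiff 0 k = 0 :=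
  Nat.eq_of_testBit_eq fun i => by simp [Nat.testBit_ldiff]

theorem pv_ldiff_zero_right (n : Nat) : Nat.ldiff n 0 = n :=
  Nat.eq_of_testBit_eq fun i => by simp [Nat.testBit_ldiff]

theorem pv_ldiff_one_one : Nat.ldiff 1 1 = 0 :=
  Nat.eq_of_testBit_eq fun i => by simp [Nat.testBit_ldiff]

theorem pv_and_add_ldiff : ∀ (n k : Nat), (n &&& k) + Nat.ldiff n k = n := by
  intro n
  induction n using Nat.strong_induction_on with
  | _ n ih =>
    intro k
    rcases Nat.eq_zero_or_pos n with h0 | hpos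
    · subst h0; simp [pv_ldiff_zero_left]
    · have h2 : n / 2 < n := Nat.div_lt_self hpos (by norm_num)
      have e1 : (n &&& k) / 2 = n / 2 &&& k / 2 := Nat.and_div_two
      have e2 : (n &&& k) % 2 = n % 2 &&& k % 2 := by
        simpa using @Nat.and_mod_two_pow n k 1
      have e3 : Nat.ldiff n k / 2 = Nat.ldiff (n / 2) (k / 2) := by
        have := @Nat.bitwise_div_two_pow (fun a b => a && !b) n k 1 rfl
        simpa [Nat.ldiff, Nat.pow_one] using this
      have e4 : Nat.ldiff n k % 2 = Nat.ldiff (n % 2) (k % 2) := by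
        have := @Nat.bitwise_mod_two_pow (fun a b => a && !b) n k 1 rfl
        simpa [Nat.ldiff, Nat.pow_one] using this
      have ihh := ih (n / 2) h2 (k / 2)
      have hb : (n % 2 &&& k % 2) + Nat.ldiff (n % 2) (k % 2) = n % 2 := by
        rcases Nat.mod_two_eq_zero_or_one n with h | h <;>
          rcases Nat.mod_two_eq_zero_or_one k with h' | h' <;> rw [h, h'] <;>
          simp [pv_ldiff_zero_left, pv_ldiff_zero_right, pv_ldiff_one_one]
      omega


theorem pv_sub_and_eq_ldiff (n k : Nat) : n - (n &&& k) = Nat.ldiff n k := by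
  have := pv_and_add_ldiff n k
  omega

def pvIbit (x : Int) (i : Nat) : Bool := if 0 ≤ x then x.toNat.testBit i else !((-x - 1).toNat.testBit i)

theorem pvIbit_bxor (a b : Int) (i : Nat) : pvIbit (PySem.Int.bxor a b) i = xor (pvIbit a i) (pvIbit b i) := by
  unfold pvIbit PySem.Int.bxor
  by_cases ha : 0 ≤ a <;> by_cases hb : 0 ≤ b <;> simp only [ha, hb, if_true, if_false]
  · have h : (0:Int) ≤ ((a.toNat ^^^ b.toNat : Nat) : Int) := by positivity
    simp [h, Nat.testBit_xor]
  · simp [Nat.testBit_xor]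
    intro _
    omega
  · simp [Nat.testBit_xor]
    intro _
    omega
  · simp [Nat.testBit_xor]

theorem pvIbit_band (a b : Int) (i : Nat) : pvIbit (PySem.Int.band a b) i = (pvIbit a i && pvIbit b i) := by
  unfold pvIbit PySem.Int.band
  by_cases ha : 0 ≤ a <;> by_cases hb : 0 ≤ b <;> simp only [ha, hb, if_true, if_false]
  · have h : (0:Int) ≤ ((a.toNat &&& b.toNat : Nat) : Int) := by positivity
    simp [h, Nat.testBit_and]
  · rw [pv_sub_and_eq_ldiff]
    simp [Nat.testBit_ldiff]
  · rw [pv_sub_and_eq_ldiff]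
    simp [Nat.testBit_ldiff, Bool.and_comm]
  · simp [Nat.testBit_or]
    intros
    omega

theorem pvIbit_bor (a b : Int) (i : Nat) : pvIbit (PySem.Int.bor a b) i = (pvIbit a i || pvIbit b i) := by
  unfold pvIbit PySem.Int.bor
  by_cases ha : 0 ≤ a <;> by_cases hb : 0 ≤ b <;> simp only [ha, hb, if_true, if_false]
  · have h : (0:Int) ≤ ((a.toNat ||| b.toNat : Nat) : Int) := by positivity
    simp [h, Nat.testBit_or]
  · rw [pv_sub_and_eq_ldiff]
    simp [Nat.testBit_ldiff, Bool.or_comm]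
    intros
    omega
  · rw [pv_sub_and_eq_ldiff]
    simp [Nat.testBit_ldiff]
    intros
    omega
  · simp [Nat.testBit_and]
    intros
    omega

theorem pv_testBit_big (m k : Nat) (h : m < 2 ^ k) : m.testBit k = false :=
  Nat.testBit_lt_two_pow h

theorem pvIbit_inj (x y : Int) (h : ∀ i, pvIbit x i = pvIbit y i) : x = y := by
  unfold pvIbit at h
  by_cases hx : 0 ≤ x <;> by_cases hy : 0 ≤ y
  · have := Nat.eq_of_testBit_eq (x := x.toNat) (y := y.toNat) (by intro i; have := h i; simpa [hx, hy] using this)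
    omega
  · exfalso
    have hb := h (x.toNat + (-y-1).toNat)
    simp only [hx, hy, if_true, if_false] at hb
    rw [pv_testBit_big, pv_testBit_big] at hb
    · simp at hb
    · calc (-y-1).toNat < 2 ^ (-y-1).toNat := Nat.lt_two_pow_self
        _ ≤ 2 ^ (x.toNat + (-y-1).toNat) := Nat.pow_le_pow_right (by norm_num) (by omega)
    · calc x.toNat < 2 ^ x.toNat := Nat.lt_two_pow_self
        _ ≤ 2 ^ (x.toNat + (-y-1).toNat) := Nat.pow_le_pow_right (by norm_num) (by omega)
  · exfalso
    have hb := h ((-x-1).toNat + y.toNat)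
    simp only [hx, hy, if_true, if_false] at hb
    rw [pv_testBit_big, pv_testBit_big] at hb
    · simp at hb
    · calc y.toNat < 2 ^ y.toNat := Nat.lt_two_pow_self
        _ ≤ 2 ^ ((-x-1).toNat + y.toNat) := Nat.pow_le_pow_right (by norm_num) (by omega)
    · calc (-x-1).toNat < 2 ^ (-x-1).toNat := Nat.lt_two_pow_self
        _ ≤ 2 ^ ((-x-1).toNat + y.toNat) := Nat.pow_le_pow_right (by norm_num) (by omega)
  · have := Nat.eq_of_testBit_eq (x := (-x-1).toNat) (y := (-y-1).toNat)
      (by intro i; have := h i; simp [hx, hy] at this; simpa using this)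
    omega

theorem pv_foldl_reassoc (op : Int → Int → Int)
    (hassoc : ∀ x y z, op (op x y) z = op x (op y z)) :
    ∀ (l : List Int) (x y : Int), l.foldl op (op x y) = op x (l.foldl op y) := by
  intro l
  induction l with
  | nil => intro x y; simp
  | cons c l ih => intro x y; simp only [List.foldl, hassoc]; exact ih x (op y c)

theorem pvTreeReduce_eq (op : Int → Int → Int)
    (hassoc : ∀ x y z, op (op x y) z = op x (op y z)) :
    ∀ (n : Nat) (a : Int) (l : List Int), l.length < n →
      pvTreeReduce op (a :: l) = l.foldl op a := by
  intro n
  induction n with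
  | zero => intro a l h; omega
  | succ n ih =>
    intro a l h
    match l with
    | [] => simp [pvTreeReduce]
    | b :: rest =>
      rw [pvTreeReduce]
      set m := (a :: b :: rest).length / 2 with hm
      have hlen : (a :: b :: rest).length = rest.length + 2 := by simp
      have hm1 : 1 ≤ m := by rw [hm, hlen]; omega
      have hmlt : m < rest.length + 2 := by rw [hm, hlen]; omega
      -- take part
      have htake : (a :: b :: rest).take m = a :: (b :: rest).take (m - 1) := by
        have h' : m = (m - 1) + 1 := by omega
        conv_lhs => rw [h']
        rw [List.take_succ_cons]
      -- drop part nonempty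
      have hdlen : ((a :: b :: rest).drop m).length = rest.length + 2 - m := by
        simp [hlen]
      obtain ⟨c, u, hd⟩ : ∃ c u, (a :: b :: rest).drop m = c :: u := by
        cases hcase : (a :: b :: rest).drop m with
        | nil => rw [hcase] at hdlen; simp at hdlen; omega
        | cons c u => exact ⟨c, u, rfl⟩
      have hulen : u.length = rest.length + 1 - m := by
        have := hdlen; rw [hd] at this; simp at this; omega
      have htlen : ((b :: rest).take (m - 1)).length = m - 1 := by
        simp; omega
      rw [htake, hd]
      rw [ih a ((b :: rest).take (m - 1)) (by rw [htlen]; simp at h; omega)]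
      rw [ih c u (by rw [hulen]; simp at h; omega)]
      -- recombine
      have hsplit : (a :: (b :: rest).take (m - 1)) ++ (c :: u) = a :: b :: rest := by
        rw [← htake, ← hd, List.take_append_drop]
      have : (b :: rest) = (b :: rest).take (m - 1) ++ (c :: u) := by
        have := hsplit
        simpa using this.symm
      rw [show (b :: rest).foldl op a = (((b :: rest).take (m - 1)) ++ (c :: u)).foldl op a from by rw [← this]]
      rw [List.foldl_append]
      simp only [List.foldl]
      exact (pv_foldl_reassoc op hassoc u _ c).symm

theorem pv_band_assoc (x y z : Int) : PySem.Int.band (PySem.Int.band x y) z = PySem.Int.band x (PySem.Int.band y z) := by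
  apply pvIbit_inj; intro i; simp [pvIbit_band, Bool.and_assoc]

theorem pv_bor_assoc (x y z : Int) : PySem.Int.bor (PySem.Int.bor x y) z = PySem.Int.bor x (PySem.Int.bor y z) := by
  apply pvIbit_inj; intro i; simp [pvIbit_bor, Bool.or_assoc]

theorem pv_bxor_assoc (x y z : Int) : PySem.Int.bxor (PySem.Int.bxor x y) z = PySem.Int.bxor x (PySem.Int.bxor y z) := by
  apply pvIbit_inj; intro i; simp [pvIbit_bxor]

-- ===== VERDICT (by name: the statement is the Claim_ definition above) =====
theorem apply_gate_py_spec : Claim_equal_apply_gate_py := by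
  intro gname in_bits _
  unfold Spec_apply_gate_py
  have hAND : pvTreeReduce PySem.Int.band (1 :: in_bits) = in_bits.foldl (fun v b => PySem.Int.band v b) 1 :=
    pvTreeReduce_eq _ pv_band_assoc (in_bits.length + 1) 1 in_bits (by omega)
  have hOR : pvTreeReduce PySem.Int.bor (0 :: in_bits) = in_bits.foldl (fun v b => PySem.Int.bor v b) 0 :=
    pvTreeReduce_eq _ pv_bor_assoc (in_bits.length + 1) 0 in_bits (by omega)
  have hXOR : pvTreeReduce PySem.Int.bxor (0 :: in_bits) = in_bits.foldl (fun v b => PySem.Int.bxor v b) 0 :=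
    pvTreeReduce_eq _ pv_bxor_assoc (in_bits.length + 1) 0 in_bits (by omega)
  by_cases h1 : gname = "AND"
  · subst h1; simp [apply_gate_py, apply_gate_py_alt, pvOpsTable, PySem.Dict.get?, hAND]
  by_cases h2 : gname = "OR"
  · subst h2; simp [apply_gate_py, apply_gate_py_alt, pvOpsTable, PySem.Dict.get?, hOR]
  by_cases h3 : gname = "XOR"
  · subst h3; simp [apply_gate_py, apply_gate_py_alt, pvOpsTable, PySem.Dict.get?, hXOR]
  by_cases h4 : gname = "NAND"
  · subst h4; simp [apply_gate_py, apply_gate_py_alt, pvOpsTable, PySem.Dict.get?, hAND]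
  by_cases h5 : gname = "NOR"
  · subst h5; simp [apply_gate_py, apply_gate_py_alt, pvOpsTable, PySem.Dict.get?, hOR]
  by_cases h6 : gname = "XNOR"
  · subst h6; simp [apply_gate_py, apply_gate_py_alt, pvOpsTable, PySem.Dict.get?, hXOR]
  · simp [apply_gate_py, apply_gate_py_alt, pvOpsTable, PySem.Dict.get?, h1, h2, h3, h4, h5, h6,
      Ne.symm h1, Ne.symm h2, Ne.symm h3, Ne.symm h4, Ne.symm h5, Ne.symm h6]
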